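-- pv_equiv track=rewrite | github.com/AKJUS/platform | plugins/tuturuuu/skills/tuturuuu-review-comments/scripts/fetch_review_threads.py | count_threads
-- ===== SOURCE A (Python) =====
-- from typing import Any
--
-- def is_active_thread(thread: dict[str, Any]) -> bool:
--     return not thread.get("isResolved") and not thread.get("isOutdated")
--
-- def count_threads(threads: list[dict[str, Any]]) -> dict[str, int]:
--     resolved = sum(1 for thread in threads if thread.get("isResolved"))
--     outdated = sum(1 for thread in threads if thread.get("isOutdated"))
--     active_unresolved = sum(1 for thread in threads if is_active_thread(thread))
--     unresolved = sum(1 for thread in threads if not thread.get("isResolved"))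
--
--     return {
--         "total": len(threads),
--         "resolved": resolved,
--         "unresolved": unresolved,
--         "outdated": outdated,
--         "active_unresolved": active_unresolved,
--     }
-- ===== SOURCE B (Python) =====
-- def count_threads(threads):
--     # Classify each thread into a joint (resolved?, outdated?) category, build a
--     # histogram over the four categories, then derive all counts arithmetically.
--     keys = [(bool(thread.get("isResolved")), bool(thread.get("isOutdated")))
--             for thread in threads]
--     hist = {}
--     for key in keys:
--         hist[key] = hist.get(key, 0) + 1
--     total = len(threads)
--     resolved = hist.get((True, True), 0) + hist.get((True, False), 0)
--     outdated = hist.get((True, True), 0) + hist.get((False, True), 0)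
--     return {
--         "total": total,
--         "resolved": resolved,
--         "unresolved": total - resolved,
--         "outdated": outdated,
--         "active_unresolved": hist.get((False, False), 0),
--     }
-- ===== Notes on version B (the rewrite author's own statement) =====
-- stated objective: alternative
-- what changed: Instead of counting four predicates over the thread list, B classifies each thread into a joint (resolved, outdated) category, builds a 4-bin histogram dict over those categories, and derives all five outputs arithmetically from the histogram (unresolved as total - resolved).
import Mathlib
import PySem

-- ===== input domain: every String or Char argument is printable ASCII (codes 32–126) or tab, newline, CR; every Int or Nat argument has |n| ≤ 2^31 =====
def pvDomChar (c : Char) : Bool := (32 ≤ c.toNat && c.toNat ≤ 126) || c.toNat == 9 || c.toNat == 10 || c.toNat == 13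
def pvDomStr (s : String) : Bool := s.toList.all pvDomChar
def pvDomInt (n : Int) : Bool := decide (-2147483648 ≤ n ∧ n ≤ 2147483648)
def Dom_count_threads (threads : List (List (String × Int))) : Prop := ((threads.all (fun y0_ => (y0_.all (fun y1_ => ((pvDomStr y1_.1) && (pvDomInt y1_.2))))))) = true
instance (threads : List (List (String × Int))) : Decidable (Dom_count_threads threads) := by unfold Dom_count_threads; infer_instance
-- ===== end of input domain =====

-- B classifies each thread into a joint (resolved, outdated) category, builds a histogram
-- over the four categories, and derives the five counts arithmetically (objective: alternative).

-- shared helper: truthiness of thread.get(k) (None → falsy, int v → v ≠ 0; first-match lookup)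
def getTruthy (thread : List (String × Int)) (k : String) : Bool :=
  match thread.find? (fun p => p.1 == k) with
  | some (_, v) => v != 0
  | none => false

def is_active_thread (thread : List (String × Int)) : Bool :=
  !(getTruthy thread "isResolved") && !(getTruthy thread "isOutdated")

-- ===== PORT A =====
def count_threads (threads : List (List (String × Int))) : List (String × Int) :=
  let resolved := threads.foldl (fun acc t => if getTruthy t "isResolved" then acc + 1 else acc) (0 : Int)
  let outdated := threads.foldl (fun acc t => if getTruthy t "isOutdated" then acc + 1 else acc) (0 : Int)
  let active_unresolved := threads.foldl (fun acc t => if is_active_thread t then acc + 1 else acc) (0 : Int)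
  let unresolved := threads.foldl (fun acc t => if !(getTruthy t "isResolved") then acc + 1 else acc) (0 : Int)
  [("total", (threads.length : Int)), ("resolved", resolved), ("unresolved", unresolved),
   ("outdated", outdated), ("active_unresolved", active_unresolved)]

-- ===== PORT B =====
-- B's per-thread category (the tuple built in Source B's comprehension)
def threadKey (thread : List (String × Int)) : Bool × Bool :=
  (getTruthy thread "isResolved", getTruthy thread "isOutdated")

def count_threads_alt (threads : List (List (String × Int))) : List (String × Int) :=
  let keys := threads.map threadKey
  let hist := keys.foldl (fun (d : PySem.Dict (Bool × Bool) Int) k => d.insert k (d.getD k 0 + 1)) PySem.Dict.empty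
  let total : Int := threads.length
  let resolved := hist.getD (true, true) 0 + hist.getD (true, false) 0
  let outdated := hist.getD (true, true) 0 + hist.getD (false, true) 0
  [("total", total), ("resolved", resolved), ("unresolved", total - resolved),
   ("outdated", outdated), ("active_unresolved", hist.getD (false, false) 0)]

-- ===== PRECONDITION & SPEC =====
def Spec_count_threads (threads : List (List (String × Int))) (out : List (String × Int)) : Prop := out = count_threads_alt threads
instance (threads : List (List (String × Int))) (out : List (String × Int)) : Decidable (Spec_count_threads threads out) := by unfold Spec_count_threads; infer_instance

-- ===== CLAIM =====
def Claim_equal_count_threads : Prop := ∀ (threads : List (List (String × Int))), Dom_count_threads threads → Spec_count_threads threads (count_threads threads)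

-- ===== LEMMAS AND PROOFS =====
theorem foldl_if_count (l : List (List (String × Int))) (p : List (String × Int) → Bool) (a : Int) :
    l.foldl (fun acc t => if p t then acc + 1 else acc) a = a + (l.countP p : Int) := by
  induction l generalizing a with
  | nil => simp
  | cons t ts ih =>
    simp only [List.foldl_cons, List.countP_cons, ih]
    split_ifs with h <;> simp [h] <;> ring

theorem hist_getD (threads : List (List (String × Int))) (k : Bool × Bool) :
    ((threads.map threadKey).foldl
      (fun (d : PySem.Dict (Bool × Bool) Int) k => d.insert k (d.getD k 0 + 1)) PySem.Dict.empty).getD k 0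
    = ((threads.countP (fun t => threadKey t == k) : Nat) : Int) := by
  rw [PySem.Dict.getD_foldl_insert_add_one, PySem.Dict.getD_empty, List.count_eq_countP, List.countP_map]
  simp [Function.comp_def]

theorem count_split_r (l : List (List (String × Int))) :
    l.countP (fun t => getTruthy t "isResolved")
    = l.countP (fun t => threadKey t == (true, true)) + l.countP (fun t => threadKey t == (true, false)) := by
  induction l with
  | nil => rfl
  | cons t ts ih =>
    simp only [List.countP_cons, ih]
    cases h1 : getTruthy t "isResolved" <;> cases h2 : getTruthy t "isOutdated" <;>
      simp [threadKey, h1, h2] <;> omega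

theorem count_split_o (l : List (List (String × Int))) :
    l.countP (fun t => getTruthy t "isOutdated")
    = l.countP (fun t => threadKey t == (true, true)) + l.countP (fun t => threadKey t == (false, true)) := by
  induction l with
  | nil => rfl
  | cons t ts ih =>
    simp only [List.countP_cons, ih]
    cases h1 : getTruthy t "isResolved" <;> cases h2 : getTruthy t "isOutdated" <;>
      simp [threadKey, h1, h2] <;> omega

theorem count_active (l : List (List (String × Int))) :
    l.countP is_active_thread = l.countP (fun t => threadKey t == (false, false)) := by
  induction l with
  | nil => rfl
  | cons t ts ih =>
    simp only [List.countP_cons, ih]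
    cases h1 : getTruthy t "isResolved" <;> cases h2 : getTruthy t "isOutdated" <;>
      simp [threadKey, is_active_thread, h1, h2]

theorem count_unres (l : List (List (String × Int))) :
    l.countP (fun t => !(getTruthy t "isResolved")) + l.countP (fun t => getTruthy t "isResolved") = l.length := by
  induction l with
  | nil => rfl
  | cons t ts ih =>
    simp only [List.countP_cons, List.length_cons]
    cases h1 : getTruthy t "isResolved" <;> simp [h1] <;> omega

-- ===== VERDICT =====
theorem count_threads_spec : Claim_equal_count_threads := by
  intro threads _
  unfold Spec_count_threads count_threads count_threads_alt
  simp only [foldl_if_count, hist_getD, zero_add]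
  have hr := count_split_r threads
  have ho := count_split_o threads
  have ha := count_active threads
  have hu := count_unres threads
  refine List.ext_getElem (by simp) ?_
  intro i h1 h2
  simp only [List.length_cons, List.length_nil] at h1
  match i, h1 with
  | 0, _ => simp
  | 1, _ => simp; omega
  | 2, _ => simp; omega
  | 3, _ => simp; omega
  | 4, _ => simp; omega
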